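-- pv_equiv track=rewrite | github.com/david20571015/auto-demo | src/grader.py | _output_equal
-- ===== SOURCE A (Python) =====
-- def _output_equal(output, answer):
--     output_lines = output.split('\n')
--     answer_lines = answer.split('\n')
--     if len(output_lines) != len(answer_lines):
--         return False
--     for (output_line, answer_line) in zip(output_lines, answer_lines):
--         if len(output_line.split()) != len(answer_line.split()):
--             return False
--         for (output_token, answer_token) in zip(output_line.split(),
--                                                 answer_line.split()):
--             if output_token != answer_token:
--                 return False
--     return True
-- ===== SOURCE B (Python) =====
-- def _output_equal(output, answer):
--     def normalize(s):
--         return '\n'.join(' '.join(line.split()) for line in s.split('\n'))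
--     return normalize(output) == normalize(answer)
-- ===== Notes on version B (the rewrite author's own statement) =====
-- stated objective: simpler
-- what changed: B replaces A's length guard and nested line/token comparison loops with a construct-then-compare: each string is mapped to a canonical normal form (lines rejoined from their whitespace-split tokens) and the two canonical strings are compared with ==.
import Mathlib
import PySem

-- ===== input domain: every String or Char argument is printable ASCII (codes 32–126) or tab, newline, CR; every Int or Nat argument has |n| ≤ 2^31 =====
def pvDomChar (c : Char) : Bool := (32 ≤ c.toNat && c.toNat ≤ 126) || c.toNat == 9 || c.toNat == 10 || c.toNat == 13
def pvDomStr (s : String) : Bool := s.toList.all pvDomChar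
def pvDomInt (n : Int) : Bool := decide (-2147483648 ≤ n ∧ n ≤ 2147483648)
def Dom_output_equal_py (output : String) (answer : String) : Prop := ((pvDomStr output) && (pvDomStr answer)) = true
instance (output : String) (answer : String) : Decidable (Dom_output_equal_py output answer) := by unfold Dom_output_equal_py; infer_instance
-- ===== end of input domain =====

-- B replaces A's nested line/token loops by comparing canonical whitespace-normal forms (objective: simpler).

-- ===== PORT A =====
-- inner 'for (output_token, answer_token) in zip(...)' loop
def pyTokLoop : List (List Char × List Char) → Bool
  | [] => true
  | (ot, at') :: rest => if ot ≠ at' then false else pyTokLoop rest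

-- outer 'for (output_line, answer_line) in zip(...)' loop
def pyLineLoop : List (List Char × List Char) → Bool
  | [] => true
  | (ol, al) :: rest =>
      if (PySem.Chars.split₀ ol).length ≠ (PySem.Chars.split₀ al).length then false
      else if pyTokLoop ((PySem.Chars.split₀ ol).zip (PySem.Chars.split₀ al)) then pyLineLoop rest
      else false

def output_equal_py (output : String) (answer : String) : Bool :=
  let output_lines := PySem.Chars.splitOn output.toList ['\n']
  let answer_lines := PySem.Chars.splitOn answer.toList ['\n']
  if output_lines.length ≠ answer_lines.length then false
  else pyLineLoop (output_lines.zip answer_lines)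

-- ===== PORT B =====
-- '\n'.join(' '.join(line.split()) for line in s.split('\n'))
def pyNormalize (s : String) : List Char :=
  PySem.Chars.join ['\n']
    ((PySem.Chars.splitOn s.toList ['\n']).map
      (fun line => PySem.Chars.join [' '] (PySem.Chars.split₀ line)))

def output_equal_py_alt (output : String) (answer : String) : Bool :=
  pyNormalize output == pyNormalize answer

-- ===== PRECONDITION & SPEC =====
def Spec_output_equal_py (output : String) (answer : String) (out : Bool) : Prop := out = output_equal_py_alt output answer
instance (output : String) (answer : String) (out : Bool) : Decidable (Spec_output_equal_py output answer out) := by unfold Spec_output_equal_py; infer_instance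

-- ===== CLAIM (what is proved, stated in full; the proofs are below) =====
def Claim_equal_output_equal_py : Prop := ∀ (output : String) (answer : String), Dom_output_equal_py output answer → Spec_output_equal_py output answer (output_equal_py output answer)

-- ===== LEMMAS AND PROOFS =====

-- splitOn never returns the empty list
theorem splitOn_go_ne_nil (sep : List Char) (fuel : Nat) (l cur : List Char)
    (acc : List (List Char)) : PySem.Chars.splitOn.go sep fuel l cur acc ≠ [] := by
  induction fuel generalizing l cur acc with
  | zero => simp [PySem.Chars.splitOn.go]
  | succ fuel ih =>
    cases l with
    | nil => simp [PySem.Chars.splitOn.go]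
    | cons c rest =>
      simp only [PySem.Chars.splitOn.go]
      split
      · exact ih _ _ _
      · exact ih _ _ _

theorem splitOn_ne_nil (s sep : List Char) : PySem.Chars.splitOn s sep ≠ [] :=
  splitOn_go_ne_nil _ _ _ _ _

-- every token produced by split() is nonempty and whitespace-free
theorem split₀_go_good (s cur : List Char) (acc : List (List Char))
    (hacc : ∀ t ∈ acc, t ≠ [] ∧ ∀ ch ∈ t, PySem.Chars.isspace ch = false)
    (hcur : ∀ ch ∈ cur, PySem.Chars.isspace ch = false) :
    ∀ t ∈ PySem.Chars.split₀.go s cur acc,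
      t ≠ [] ∧ ∀ ch ∈ t, PySem.Chars.isspace ch = false := by
  induction s generalizing cur acc with
  | nil =>
    simp only [PySem.Chars.split₀.go]
    split
    · simpa using hacc
    · rename_i hne
      simp only [List.mem_reverse, List.mem_cons]
      rintro t (rfl | ht)
      · refine ⟨by simpa [List.isEmpty_iff] using hne, ?_⟩
        intro ch hch; exact hcur ch (List.mem_reverse.mp hch)
      · exact hacc _ ht
  | cons c rest ih =>
    simp only [PySem.Chars.split₀.go]
    split
    · rename_i hsp
      split
      · exact ih [] acc hacc (by simp)
      · rename_i hne
        refine ih [] _ ?_ (by simp)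
        intro t ht
        rcases List.mem_cons.mp ht with rfl | ht
        · refine ⟨by simpa [List.isEmpty_iff] using hne, ?_⟩
          intro ch hch; exact hcur ch (List.mem_reverse.mp hch)
        · exact hacc _ ht
    · rename_i hsp
      refine ih (c :: cur) acc hacc ?_
      intro ch hch
      rcases List.mem_cons.mp hch with rfl | hch
      · simpa using hsp
      · exact hcur ch hch

theorem split₀_good (s : List Char) :
    ∀ t ∈ PySem.Chars.split₀ s,
      t ≠ [] ∧ ∀ ch ∈ t, PySem.Chars.isspace ch = false :=
  split₀_go_good s [] [] (by simp) (by simp)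

-- any character of a join is the separator character or a character of a part
theorem mem_join (c : Char) (ts : List (List Char)) (x : Char)
    (hx : x ∈ PySem.Chars.join [c] ts) : x = c ∨ ∃ t ∈ ts, x ∈ t := by
  induction ts with
  | nil => simp [PySem.Chars.join_nil] at hx
  | cons t ts ih =>
    cases ts with
    | nil =>
      rw [PySem.Chars.join_singleton] at hx
      exact Or.inr ⟨t, by simp, hx⟩
    | cons u us =>
      rw [PySem.Chars.join_cons_cons] at hx
      rcases List.mem_append.mp hx with h | h
      · rcases List.mem_append.mp h with h | h
        · exact Or.inr ⟨t, by simp, h⟩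
        · exact Or.inl (by simpa using h)
      · rcases ih h with h | ⟨v, hv, hxv⟩
        · exact Or.inl h
        · exact Or.inr ⟨v, by simp [hv], hxv⟩

-- a chunk boundary argument: c-free blocks followed by nothing-or-c match up
theorem chunk_inj (c : Char) (t u r₁ r₂ : List Char)
    (ht : c ∉ t) (hu : c ∉ u)
    (hr₁ : r₁ = [] ∨ ∃ w, r₁ = c :: w) (hr₂ : r₂ = [] ∨ ∃ w, r₂ = c :: w)
    (h : t ++ r₁ = u ++ r₂) : t = u ∧ r₁ = r₂ := by
  induction t generalizing u with
  | nil =>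
    cases u with
    | nil => exact ⟨rfl, by simpa using h⟩
    | cons d u' =>
      exfalso
      simp only [List.nil_append] at h
      rcases hr₁ with rfl | ⟨w, rfl⟩
      · exact absurd h.symm (by simp)
      · have : d = c := by
          have := congrArg (fun l => l.head?) h
          simpa using this.symm
        exact hu (by simp [this])
  | cons a t' ih =>
    cases u with
    | nil =>
      exfalso
      simp only [List.nil_append] at h
      rcases hr₂ with rfl | ⟨w, rfl⟩
      · exact absurd h (by simp)
      · have : a = c := by
          have := congrArg (fun l => l.head?) h
          simpa using this
        exact ht (by simp [this])
    | cons d u' =>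
      simp only [List.cons_append, List.cons.injEq] at h
      obtain ⟨rfl, h⟩ := h
      have := ih u' (fun hm => ht (List.mem_cons_of_mem _ hm))
        (fun hm => hu (List.mem_cons_of_mem _ hm)) h
      exact ⟨by rw [this.1], this.2⟩

-- join with a single separator char is injective on nonempty lists of c-free parts
theorem joinc_inj (c : Char) (t : List Char) (ts : List (List Char))
    (u : List Char) (us : List (List Char))
    (hts : ∀ p ∈ t :: ts, c ∉ p) (hus : ∀ p ∈ u :: us, c ∉ p)
    (h : PySem.Chars.join [c] (t :: ts) = PySem.Chars.join [c] (u :: us)) :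
    t :: ts = u :: us := by
  induction ts generalizing t u us with
  | nil =>
    cases us with
    | nil =>
      rw [PySem.Chars.join_singleton, PySem.Chars.join_singleton] at h
      simp [h]
    | cons v us' =>
      rw [PySem.Chars.join_singleton, PySem.Chars.join_cons_cons] at h
      have h' : t ++ ([] : List Char) = u ++ (c :: PySem.Chars.join [c] (v :: us')) := by
        simpa using h
      have := chunk_inj c t u [] _ (hts t (by simp)) (hus u (by simp))
        (Or.inl rfl) (Or.inr ⟨_, rfl⟩) h'
      exact absurd this.2.symm (by simp)
  | cons s ts' ih =>
    cases us with
    | nil =>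
      rw [PySem.Chars.join_cons_cons, PySem.Chars.join_singleton] at h
      have h' : t ++ (c :: PySem.Chars.join [c] (s :: ts')) = u ++ ([] : List Char) := by
        simpa using h
      have := chunk_inj c t u _ [] (hts t (by simp)) (hus u (by simp))
        (Or.inr ⟨_, rfl⟩) (Or.inl rfl) h'
      exact absurd this.2 (by simp)
    | cons v us' =>
      rw [PySem.Chars.join_cons_cons, PySem.Chars.join_cons_cons] at h
      have h' : t ++ (c :: PySem.Chars.join [c] (s :: ts'))
          = u ++ (c :: PySem.Chars.join [c] (v :: us')) := by
        simpa using h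
      have hc := chunk_inj c t u _ _ (hts t (by simp)) (hus u (by simp))
        (Or.inr ⟨_, rfl⟩) (Or.inr ⟨_, rfl⟩) h'
      have heq : PySem.Chars.join [c] (s :: ts') = PySem.Chars.join [c] (v :: us') := by
        have := hc.2
        injection this
      have htl : s :: ts' = v :: us' :=
        ih s v us' (fun p hp => hts p (List.mem_cons_of_mem _ hp))
          (fun p hp => hus p (List.mem_cons_of_mem _ hp)) heq
      simp [hc.1, htl]

-- ' '-join is injective on token lists whose tokens are nonempty and space-free
theorem joinsp_inj (ts us : List (List Char))
    (hts : ∀ t ∈ ts, t ≠ [] ∧ (' ' : Char) ∉ t)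
    (hus : ∀ t ∈ us, t ≠ [] ∧ (' ' : Char) ∉ t)
    (h : PySem.Chars.join [' '] ts = PySem.Chars.join [' '] us) : ts = us := by
  cases ts with
  | nil =>
    cases us with
    | nil => rfl
    | cons u us' =>
      exfalso
      rw [PySem.Chars.join_nil] at h
      cases us' with
      | nil =>
        rw [PySem.Chars.join_singleton] at h
        exact (hus u (by simp)).1 h.symm
      | cons v vs =>
        rw [PySem.Chars.join_cons_cons] at h
        rcases List.exists_cons_of_ne_nil (hus u (by simp)).1 with ⟨a, u', rfl⟩
        simp at h
  | cons t ts' =>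
    cases us with
    | nil =>
      exfalso
      rw [PySem.Chars.join_nil] at h
      cases ts' with
      | nil =>
        rw [PySem.Chars.join_singleton] at h
        exact (hts t (by simp)).1 h
      | cons v vs =>
        rw [PySem.Chars.join_cons_cons] at h
        rcases List.exists_cons_of_ne_nil (hts t (by simp)).1 with ⟨a, t', rfl⟩
        simp at h
    | cons u us' =>
      exact joinc_inj ' ' t ts' u us' (fun p hp => (hts p hp).2) (fun p hp => (hus p hp).2) h

-- the inner token loop decides equality of the (equal-length) token lists
theorem pyTokLoop_eq (ts us : List (List Char)) (hlen : ts.length = us.length) :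
    pyTokLoop (ts.zip us) = decide (ts = us) := by
  induction ts generalizing us with
  | nil => cases us with
    | nil => simp [pyTokLoop]
    | cons _ _ => simp at hlen
  | cons t ts' ih =>
    cases us with
    | nil => simp at hlen
    | cons u us' =>
      simp only [List.zip_cons_cons, pyTokLoop]
      by_cases h : t = u
      · subst h
        rw [if_neg (by simp), ih us' (by simpa using hlen)]
        simp
      · simp [h]

-- the outer line loop decides equality of the per-line token lists
theorem pyLineLoop_eq (lo la : List (List Char)) (hlen : lo.length = la.length) :
    pyLineLoop (lo.zip la)
      = decide (lo.map PySem.Chars.split₀ = la.map PySem.Chars.split₀) := by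
  induction lo generalizing la with
  | nil => cases la with
    | nil => simp [pyLineLoop]
    | cons _ _ => simp at hlen
  | cons ol lo' ih =>
    cases la with
    | nil => simp at hlen
    | cons al la' =>
      simp only [List.zip_cons_cons, pyLineLoop]
      by_cases hl : (PySem.Chars.split₀ ol).length = (PySem.Chars.split₀ al).length
      · rw [if_neg (by simpa using hl), pyTokLoop_eq _ _ hl]
        by_cases he : PySem.Chars.split₀ ol = PySem.Chars.split₀ al
        · rw [ih la' (by simpa using hlen)]
          simp [he]
        · simp [he]
      · have : PySem.Chars.split₀ ol ≠ PySem.Chars.split₀ al := fun h => hl (by rw [h])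
        simp [hl, this]

-- a normalized line contains no newline
theorem normLine_nl_free (l : List Char) :
    ('\n' : Char) ∉ PySem.Chars.join [' '] (PySem.Chars.split₀ l) := by
  intro hmem
  rcases mem_join ' ' _ _ hmem with h | ⟨t, ht, hnt⟩
  · exact absurd h (by decide)
  · have := (split₀_good l t ht).2 '\n' hnt
    simp [PySem.Chars.isspace] at this

-- comparing normalized lines is comparing token lists
theorem map_norm_iff (lo la : List (List Char)) :
    (lo.map (fun l => PySem.Chars.join [' '] (PySem.Chars.split₀ l))
      = la.map (fun l => PySem.Chars.join [' '] (PySem.Chars.split₀ l)))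
    ↔ (lo.map PySem.Chars.split₀ = la.map PySem.Chars.split₀) := by
  induction lo generalizing la with
  | nil => cases la <;> simp
  | cons ol lo' ih =>
    cases la with
    | nil => simp
    | cons al la' =>
      simp only [List.map_cons, List.cons.injEq]
      constructor
      · rintro ⟨h1, h2⟩
        refine ⟨?_, (ih la').mp h2⟩
        refine joinsp_inj _ _ ?_ ?_ h1
        · intro t ht
          have := split₀_good ol t ht
          exact ⟨this.1, fun hm => absurd (this.2 ' ' hm) (by decide)⟩
        · intro t ht
          have := split₀_good al t ht
          exact ⟨this.1, fun hm => absurd (this.2 ' ' hm) (by decide)⟩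
      · rintro ⟨h1, h2⟩
        exact ⟨by rw [h1], (ih la').mpr h2⟩

-- the two normal forms agree iff the per-line token lists agree
theorem normalize_iff (output answer : String) :
    pyNormalize output = pyNormalize answer
      ↔ ((PySem.Chars.splitOn output.toList ['\n']).map PySem.Chars.split₀
          = (PySem.Chars.splitOn answer.toList ['\n']).map PySem.Chars.split₀) := by
  unfold pyNormalize
  constructor
  · intro h
    rw [← map_norm_iff]
    rcases List.exists_cons_of_ne_nil (splitOn_ne_nil output.toList ['\n']) with ⟨t, ts, hts⟩
    rcases List.exists_cons_of_ne_nil (splitOn_ne_nil answer.toList ['\n']) with ⟨u, us, hus⟩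
    rw [hts, hus]
    rw [hts, hus] at h
    simp only [List.map_cons] at h ⊢
    refine joinc_inj '\n' _ _ _ _ ?_ ?_ h
    · intro p hp
      rcases List.mem_cons.mp hp with rfl | hp
      · exact normLine_nl_free t
      · rcases List.mem_map.mp hp with ⟨l, _, rfl⟩
        exact normLine_nl_free l
    · intro p hp
      rcases List.mem_cons.mp hp with rfl | hp
      · exact normLine_nl_free u
      · rcases List.mem_map.mp hp with ⟨l, _, rfl⟩
        exact normLine_nl_free l
  · intro h
    rw [← map_norm_iff] at h
    rw [h]

-- ===== VERDICT (by name: the statement is the Claim_ definition above) =====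
theorem output_equal_py_spec : Claim_equal_output_equal_py := by
  intro output answer _
  unfold Spec_output_equal_py output_equal_py output_equal_py_alt
  show (if (PySem.Chars.splitOn output.toList ['\n']).length
          ≠ (PySem.Chars.splitOn answer.toList ['\n']).length then false
        else pyLineLoop ((PySem.Chars.splitOn output.toList ['\n']).zip
          (PySem.Chars.splitOn answer.toList ['\n'])))
      = (pyNormalize output == pyNormalize answer)
  have hbeq : (pyNormalize output == pyNormalize answer)
      = decide (pyNormalize output = pyNormalize answer) := by
    by_cases h : pyNormalize output = pyNormalize answer <;> simp [h]
  by_cases hlen : (PySem.Chars.splitOn output.toList ['\n']).length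
      = (PySem.Chars.splitOn answer.toList ['\n']).length
  · rw [if_neg (by simpa using hlen), pyLineLoop_eq _ _ hlen, hbeq]
    simp only [decide_eq_decide]
    exact (normalize_iff output answer).symm
  · rw [if_pos (by simpa using hlen), hbeq]
    have hne : pyNormalize output ≠ pyNormalize answer := by
      intro h
      have := (normalize_iff output answer).mp h
      exact hlen (by simpa using congrArg List.length this)
    simp [hne]
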